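-- pv_equiv track=rewrite | github.com/surinkwon/TIL | python/baekjoon/1668_트로피 진열.py | see
-- ===== SOURCE A (Python) =====
-- def see(lst):
--     min_height = lst[0]
--     can_see = 1
--     for i in range(len(lst)):
--         if lst[i] > min_height:
--             min_height = lst[i]
--             can_see += 1
--
--     return can_see
-- ===== SOURCE B (Python) =====
-- from itertools import accumulate
--
-- def see(lst):
--     run = list(accumulate(lst, max))
--     return 1 + sum(b > a for a, b in zip(run, run[1:]))
-- ===== Notes on version B (the rewrite author's own statement) =====
-- stated objective: alternative
-- what changed: B builds the prefix-maximum sequence with itertools.accumulate and counts adjacent strict increases in it, instead of A's fused loop updating a running max and counter.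
import Mathlib
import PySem

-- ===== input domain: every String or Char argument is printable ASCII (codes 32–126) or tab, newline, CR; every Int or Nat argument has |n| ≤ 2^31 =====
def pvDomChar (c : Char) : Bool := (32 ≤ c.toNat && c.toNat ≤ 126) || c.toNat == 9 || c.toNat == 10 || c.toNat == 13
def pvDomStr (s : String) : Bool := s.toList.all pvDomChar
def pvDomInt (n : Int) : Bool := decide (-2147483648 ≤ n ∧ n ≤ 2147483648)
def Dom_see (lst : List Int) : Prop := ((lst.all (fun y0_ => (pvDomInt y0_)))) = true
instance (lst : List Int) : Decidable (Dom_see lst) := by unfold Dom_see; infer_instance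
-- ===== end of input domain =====

-- B builds the prefix-maximum list first and counts adjacent strict increases, instead of A's fused loop; same cost.


-- ===== PORT A =====
-- A: min_height = lst[0] (IndexError on []); then a loop over the elements updating (min_height, can_see).
def see (lst : List Int) : Int :=
  match lst with
  | [] => 0  -- Python raises IndexError here; excluded by Pre_see
  | h :: _ =>
    (lst.foldl (fun (st : Int × Int) x => if x > st.1 then (x, st.2 + 1) else st) (h, 1)).2

-- ===== PORT B =====
-- accumulate(lst, max): running maxima, first element kept as-is
def scanMax : Int → List Int → List Int
  | _, [] => []
  | m, x :: t => (max m x) :: scanMax (max m x) t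

def see_alt (lst : List Int) : Int :=
  let run := match lst with
    | [] => []
    | h :: t => h :: scanMax h t
  (1 : Int) + ((run.zip run.tail).countP (fun p => p.2 > p.1) : Int)

-- ===== PRECONDITION & SPEC =====
-- Pre_see excludes only the empty list, on which A raises IndexError (lst[0]).
def Pre_see (lst : List Int) : Prop := lst ≠ []
instance (lst : List Int) : Decidable (Pre_see lst) := by unfold Pre_see; infer_instance
def pvWitness_see : List Int := [2, 1, 3]

def Spec_see (lst : List Int) (out : Int) : Prop := out = see_alt lst
instance (lst : List Int) (out : Int) : Decidable (Spec_see lst out) := by unfold Spec_see; infer_instance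

-- ===== CLAIM (what is proved, stated in full; the proofs are below) =====
def Claim_equal_see : Prop := ∀ (lst : List Int), Dom_see lst → Pre_see lst → Spec_see lst (see lst)

-- ===== LEMMAS AND PROOFS =====

-- A's fold from state (m, c) returns c plus B's count of strict increases along scanMax m t.
lemma fold_count (t : List Int) (m c : Int) :
    (t.foldl (fun (st : Int × Int) x => if x > st.1 then (x, st.2 + 1) else st) (m, c)).2
      = c + (((m :: scanMax m t).zip (scanMax m t)).countP (fun p => p.2 > p.1) : Int) := by
  induction t generalizing m c with
  | nil => simp [scanMax]
  | cons x t ih =>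
    by_cases hx : x > m
    · have hmax : max m x = x := max_eq_right hx.le
      simp only [List.foldl_cons, scanMax, hmax, if_pos hx, List.zip_cons_cons,
        List.countP_cons, ih]
      simp [hx]
      ring
    · have hmax : max m x = m := max_eq_left (not_lt.mp hx)
      simp only [List.foldl_cons, scanMax, hmax, if_neg hx, List.zip_cons_cons,
        List.countP_cons, ih]
      simp

lemma see_eq_alt (h : Int) (t : List Int) : see (h :: t) = see_alt (h :: t) := by
  simp only [see, see_alt, List.foldl_cons, lt_self_iff_false, if_false, List.tail_cons]
  rw [fold_count]

-- ===== VERDICT (by name: the statement is the Claim_ definition above) =====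
theorem see_spec : Claim_equal_see := by
  intro lst _ hpre
  unfold Spec_see
  cases lst with
  | nil => exact absurd rfl hpre
  | cons h t => exact see_eq_alt h t
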